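-- pv_equiv track=rewrite | github.com/ngocthienta/hackathon | test.py | create_triplets
-- ===== SOURCE A (Python) =====
-- def create_triplets(n):
--     triplets_list = []
--     while n != 0:
--         raw_num = str(n % 1000)
--         while len(raw_num) < 3:
--             raw_num = '0{}'.format(raw_num)
--         triplets_list.append(raw_num)
--         n //= 1000
--     return triplets_list
-- ===== SOURCE B (Python) =====
-- def create_triplets(n):
--     if n == 0:
--         return []
--     s = str(n)
--     s = '0' * (-len(s) % 3) + s
--     return [s[i:i + 3] for i in range(0, len(s), 3)][::-1]
-- ===== Notes on version B (the rewrite author's own statement) =====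
-- stated objective: idiomatic
-- what changed: B derives the triplets from the decimal string representation (left-pad with zeros to a multiple of 3, slice into 3-character groups, reverse) instead of A's repeated divmod-by-1000 loop with an inner zero-padding while loop.
import Mathlib
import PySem

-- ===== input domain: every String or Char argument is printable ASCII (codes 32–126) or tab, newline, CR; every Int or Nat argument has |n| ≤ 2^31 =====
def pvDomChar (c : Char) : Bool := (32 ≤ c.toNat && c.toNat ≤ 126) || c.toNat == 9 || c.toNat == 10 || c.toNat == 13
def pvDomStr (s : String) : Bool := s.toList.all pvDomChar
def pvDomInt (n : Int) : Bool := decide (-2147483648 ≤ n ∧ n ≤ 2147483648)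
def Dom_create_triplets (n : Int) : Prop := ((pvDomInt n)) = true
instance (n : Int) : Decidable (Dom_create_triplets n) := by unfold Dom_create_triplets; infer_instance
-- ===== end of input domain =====

-- B builds the triplets by padding and slicing the decimal string instead of A's divmod-by-1000 loop (idiomatic rewrite; equal on every non-negative n).


-- ===== PORT A =====
-- inner while loop: raw_num = '0{}'.format(raw_num) while len(raw_num) < 3
def pvPadA (s : String) : String :=
  if PySem.Str.len s < 3 then pvPadA (String.ofList ('0' :: s.toList)) else s
termination_by 3 - s.toList.length
decreasing_by
  rename_i h
  simp only [PySem.Str.len_eq] at h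
  simp only [String.toList_ofList, List.length_cons]
  omega

-- outer while loop; the fuel only totalizes the recursion (for non-negative n it never runs out;
-- for negative n the Python loop diverges, which Pre_ excludes)
def pvLoopA (fuel : Nat) (n : Int) (acc : List String) : List String :=
  match fuel with
  | 0 => acc
  | fuel + 1 =>
    if n ≠ 0 then
      pvLoopA fuel (PySem.Int.floordiv n 1000)
        (acc ++ [pvPadA (PySem.Int.toStr (PySem.Int.mod n 1000))])
    else acc

def create_triplets (n : Int) : List String := pvLoopA (n.natAbs + 1) n []

-- ===== PORT B =====
def create_triplets_alt (n : Int) : List String :=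
  if n = 0 then []
  else
    let s0 := PySem.Int.toChars n
    let s := List.replicate (PySem.Int.mod (-(s0.length : Int)) 3).toNat '0' ++ s0
    ((PySem.List.pyRange 0 (s.length : Int) 3).map
      (fun i => String.ofList (PySem.List.slice s (some i) (some (i + 3))))).reverse

-- ===== PRECONDITION & SPEC =====
-- A's while loop never terminates for negative n (the floor division stalls before reaching the exit), so A only returns on non-negative n.
def Pre_create_triplets (n : Int) : Prop := 0 ≤ n
instance (n : Int) : Decidable (Pre_create_triplets n) := by unfold Pre_create_triplets; infer_instance
def pvWitness_create_triplets : Int := (1002)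

def Spec_create_triplets (n : Int) (out : List String) : Prop := out = create_triplets_alt n
instance (n : Int) (out : List String) : Decidable (Spec_create_triplets n out) := by unfold Spec_create_triplets; infer_instance

-- ===== CLAIM (what is proved, stated in full; the proofs are below) =====
def Claim_equal_create_triplets : Prop := ∀ (n : Int), Dom_create_triplets n → Pre_create_triplets n → Spec_create_triplets n (create_triplets n)

-- ===== LEMMAS AND PROOFS =====

-- the zero-padded string built for all lists to length ≥ 3
def pvPadTo3 (cs : List Char) : List Char := List.replicate ((3 - cs.length % 3) % 3) '0' ++ cs

-- groups of three characters, front to back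
def pvChunk3 : List Char → List String
  | [] => []
  | a :: b :: c :: rest => String.ofList [a, b, c] :: pvChunk3 rest
  | rest => [String.ofList rest]

-- the 3-character block A produces for one residue
def pvBlock3 (r : Nat) : List Char :=
  List.replicate (3 - (Nat.toDigits 10 r).length) '0' ++ Nat.toDigits 10 r

lemma pvToDigitsCore_eq (f : Nat) : ∀ (m : Nat) (acc : List Char), 0 < m → m < f →
    Nat.toDigitsCore 10 f m acc = ((Nat.digits 10 m).map Nat.digitChar).reverse ++ acc := by
  induction f with
  | zero => intro m acc _ h; omega
  | succ f ih =>
    intro m acc hm _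
    rw [Nat.toDigitsCore]
    by_cases h10 : m / 10 = 0
    · rw [if_pos h10, Nat.digits_def' (by norm_num : (1:Nat) < 10) hm, h10, Nat.digits_zero]
      simp
    · rw [if_neg h10]
      have hlt : m / 10 < m := Nat.div_lt_self hm (by norm_num)
      rw [ih (m / 10) _ (Nat.pos_of_ne_zero h10) (by omega)]
      rw [Nat.digits_def' (by norm_num : (1:Nat) < 10) hm]
      simp

lemma pvToDigits_eq (m : Nat) (h : 0 < m) :
    Nat.toDigits 10 m = ((Nat.digits 10 m).map Nat.digitChar).reverse := by
  unfold Nat.toDigits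
  simpa using pvToDigitsCore_eq (m + 1) m [] h (by omega)

lemma pvToDigits_ne_nil (m : Nat) : Nat.toDigits 10 m ≠ [] := by
  rcases Nat.eq_zero_or_pos m with h | h
  · subst h; decide
  · rw [pvToDigits_eq m h]
    simp [Nat.digits_ne_nil_iff_ne_zero.mpr (by omega : m ≠ 0)]

lemma pvDigitsLen_le (r : Nat) (h : r < 1000) : (Nat.digits 10 r).length ≤ 3 := by
  rcases Nat.eq_zero_or_pos r with h0 | h0
  · subst h0; simp
  · by_contra hlen
    have h1 : (10:Nat) ^ (Nat.digits 10 r).length ≤ 10 * r :=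
      Nat.base_pow_length_digits_le 10 r (by norm_num) (by omega)
    have h2 : (10:Nat) ^ 4 ≤ 10 ^ (Nat.digits 10 r).length :=
      Nat.pow_le_pow_right (by norm_num) (by omega)
    have : (10:Nat) ^ 4 = 10000 := by norm_num
    omega

lemma pvToDigitsLen_le (r : Nat) (h : r < 1000) : (Nat.toDigits 10 r).length ≤ 3 := by
  rcases Nat.eq_zero_or_pos r with h0 | h0
  · subst h0; decide
  · rw [pvToDigits_eq r h0]
    simpa using pvDigitsLen_le r h

lemma pvPadA_ofList (cs : List Char) (h : cs.length ≤ 3) :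
    pvPadA (String.ofList cs) = String.ofList (List.replicate (3 - cs.length) '0' ++ cs) := by
  induction h3 : 3 - cs.length generalizing cs with
  | zero =>
    have : cs.length = 3 := by omega
    rw [pvPadA]
    simp [PySem.Str.len_eq, this]
  | succ k ih =>
    rw [pvPadA]
    rw [if_pos (by simp [PySem.Str.len_eq]; omega)]
    rw [String.toList_ofList, ih ('0' :: cs) (by simp; omega) (by simp; omega)]
    congr 1
    rw [List.replicate_succ']
    simp

lemma pvBlock3_eq_digits (r : Nat) (h : r < 1000) :
    pvBlock3 r = List.replicate (3 - (Nat.digits 10 r).length) '0'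
      ++ ((Nat.digits 10 r).map Nat.digitChar).reverse := by
  rcases Nat.eq_zero_or_pos r with h0 | h0
  · subst h0; decide
  · rw [pvBlock3, pvToDigits_eq r h0]
    simp

lemma pvBlock3_length (r : Nat) (h : r < 1000) : (pvBlock3 r).length = 3 := by
  have h1 := pvToDigitsLen_le r h
  have h2 : (Nat.toDigits 10 r).length ≠ 0 := by
    simpa using pvToDigits_ne_nil r
  simp [pvBlock3]
  omega

lemma pvPadA_toStr (r : Nat) (h : r < 1000) :
    pvPadA (PySem.Int.toStr (r : Int)) = String.ofList (pvBlock3 r) := by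
  have hchars : PySem.Int.toChars (r : Int) = Nat.toDigits 10 r := by
    simp [PySem.Int.toChars]
  rw [PySem.Int.toStr, hchars,
    pvPadA_ofList (Nat.toDigits 10 r) (pvToDigitsLen_le r h)]
  rfl

-- decimal-string decomposition: peeling the last three digits
lemma pvToDigits_decomp (m : Nat) (h : 1000 ≤ m) :
    Nat.toDigits 10 m = Nat.toDigits 10 (m / 1000) ++ pvBlock3 (m % 1000) := by
  have hq : 0 < m / 1000 := Nat.div_pos h (by norm_num)
  have hr : m % 1000 < 1000 := Nat.mod_lt m (by norm_num)
  have hlen := pvDigitsLen_le (m % 1000) hr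
  have hdec := Nat.digits_append_zeroes_append_digits
    (b := 10) (k := 3 - (Nat.digits 10 (m % 1000)).length)
    (n := m % 1000) (m := m / 1000) (by norm_num) hq
  have hpow : (Nat.digits 10 (m % 1000)).length + (3 - (Nat.digits 10 (m % 1000)).length) = 3 := by
    omega
  rw [hpow] at hdec
  have hm : m % 1000 + 10 ^ 3 * (m / 1000) = m := by
    have := Nat.mod_add_div m 1000
    norm_num
    omega
  rw [hm] at hdec
  rw [pvToDigits_eq m (by omega), ← hdec, pvToDigits_eq (m / 1000) hq,
    pvBlock3_eq_digits (m % 1000) hr]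
  simp [List.reverse_append, List.map_replicate]
  exact Or.inr rfl

lemma pvPadTo3_append3 (u v : List Char) (hv : v.length = 3) :
    pvPadTo3 (u ++ v) = pvPadTo3 u ++ v := by
  simp only [pvPadTo3, List.length_append, hv]
  rw [Nat.add_mod_right]
  simp

lemma pvPadTo3_mod (cs : List Char) : (pvPadTo3 cs).length % 3 = 0 := by
  simp only [pvPadTo3, List.length_append, List.length_replicate]
  omega

lemma pvPadTo3_of_le (cs : List Char) (h1 : cs.length ≠ 0) (h2 : cs.length ≤ 3) :
    pvPadTo3 cs = List.replicate (3 - cs.length) '0' ++ cs := by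
  have : (3 - cs.length % 3) % 3 = 3 - cs.length := by omega
  rw [pvPadTo3, this]

lemma pvChunk3_three (v : List Char) (hv : v.length = 3) :
    pvChunk3 v = [String.ofList v] := by
  match v, hv with
  | [a, b, c], _ => rfl

lemma pvChunk3_append (u v : List Char) (hu : u.length % 3 = 0) (hv : v.length = 3) :
    pvChunk3 (u ++ v) = pvChunk3 u ++ [String.ofList v] := by
  match u, hu with
  | [], _ => simp [pvChunk3, pvChunk3_three v hv]
  | [a], hu => simp at hu
  | [a, b], hu => simp at hu
  | a :: b :: c :: rest, hu =>
    have : rest.length % 3 = 0 := by simp at hu; omega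
    simp only [List.cons_append, pvChunk3, pvChunk3_append rest v this hv]

lemma pvChunkMap (s : List Char) (h : s.length % 3 = 0) :
    (List.range (s.length / 3)).map
      (fun k => String.ofList ((s.drop (3 * k)).take 3)) = pvChunk3 s := by
  match s, h with
  | [], _ => simp [pvChunk3]
  | [a], h => simp at h
  | [a, b], h => simp at h
  | a :: b :: c :: rest, h =>
    have hr : rest.length % 3 = 0 := by simp at h; omega
    have hlen : (a :: b :: c :: rest).length / 3 = rest.length / 3 + 1 := by
      simp; omega
    rw [hlen, List.range_succ_eq_map, List.map_cons, List.map_map]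
    show _ :: _ = pvChunk3 (a :: b :: c :: rest)
    simp only [pvChunk3]
    congr 1
    rw [← pvChunkMap rest hr]
    apply List.map_congr_left
    intro k _
    simp only [Function.comp_apply]
    rw [show 3 * (k + 1) = 3 * k + 1 + 1 + 1 by ring]
    rfl

-- B in normal form: chunk the zero-padded digit string, reversed
lemma pvAlt_norm (m : Nat) (h : 0 < m) :
    create_triplets_alt (m : Int) = (pvChunk3 (pvPadTo3 (Nat.toDigits 10 m))).reverse := by
  have hne : (m : Int) ≠ 0 := by exact_mod_cast (by omega : m ≠ 0)
  rw [create_triplets_alt, if_neg hne]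
  have hchars : PySem.Int.toChars (m : Int) = Nat.toDigits 10 m := by
    simp [PySem.Int.toChars]
  simp only [hchars]
  set L := (Nat.toDigits 10 m).length with hL
  have hpad : (PySem.Int.mod (-(L : Int)) 3).toNat = (3 - L % 3) % 3 := by
    rw [PySem.Int.mod_eq_emod_of_pos (by norm_num)]
    omega
  rw [hpad]
  have hs : List.replicate ((3 - L % 3) % 3) '0' ++ Nat.toDigits 10 m
      = pvPadTo3 (Nat.toDigits 10 m) := by rw [pvPadTo3]
  rw [hs]
  set s := pvPadTo3 (Nat.toDigits 10 m) with hsdef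
  have hmod : s.length % 3 = 0 := pvPadTo3_mod _
  have hslen : 0 < s.length := by
    rw [hsdef]
    simp only [pvPadTo3, List.length_append]
    have h1 : (Nat.toDigits 10 m).length ≠ 0 := by simpa using pvToDigits_ne_nil m
    omega
  congr 1
  rw [PySem.List.pyRange_of_pos 0 (s.length : Int) (by norm_num),
    if_pos (by exact_mod_cast hslen)]
  have hT : (((s.length : Int) - 0 + 3 - 1) / 3).toNat = s.length / 3 := by
    omega
  rw [hT, ← pvChunkMap s hmod, List.map_map]
  apply List.map_congr_left
  intro k _
  simp only [Function.comp_apply, zero_add]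
  rw [PySem.List.slice_toNat s (by positivity) (by positivity)]
  congr 2; omega

-- B peels exactly the triplet A's loop body produces
lemma pvAlt_step (m : Nat) (h : 0 < m) :
    create_triplets_alt (m : Int)
      = pvPadA (PySem.Int.toStr ((m % 1000 : Nat) : Int))
        :: create_triplets_alt ((m / 1000 : Nat) : Int) := by
  by_cases hbig : 1000 ≤ m
  · have hq : 0 < m / 1000 := Nat.div_pos hbig (by norm_num)
    have hr : m % 1000 < 1000 := Nat.mod_lt m (by norm_num)
    rw [pvAlt_norm m h, pvToDigits_decomp m hbig,
      pvPadTo3_append3 _ _ (pvBlock3_length _ hr),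
      pvChunk3_append _ _ (pvPadTo3_mod _) (pvBlock3_length _ hr)]
    rw [pvAlt_norm (m / 1000) hq, pvPadA_toStr (m % 1000) hr]
    simp
  · have hr : m % 1000 = m := Nat.mod_eq_of_lt (by omega)
    have hq : m / 1000 = 0 := Nat.div_eq_of_lt (by omega)
    rw [hr, hq]
    have halt0 : create_triplets_alt ((0 : Nat) : Int) = [] := by
      simp [create_triplets_alt]
    rw [halt0, pvAlt_norm m h]
    have hlen1 : (Nat.toDigits 10 m).length ≠ 0 := by
      simpa using pvToDigits_ne_nil m
    have hlen3 : (Nat.toDigits 10 m).length ≤ 3 := pvToDigitsLen_le m (by omega)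
    rw [pvPadTo3_of_le _ hlen1 hlen3]
    have hb : List.replicate (3 - (Nat.toDigits 10 m).length) '0' ++ Nat.toDigits 10 m
        = pvBlock3 m := rfl
    rw [hb, pvChunk3_three _ (pvBlock3_length m (by omega)), pvPadA_toStr m (by omega)]
    rfl

lemma pvLoopA_spec (m : Nat) : ∀ (fuel : Nat) (acc : List String), m < fuel →
    pvLoopA fuel (m : Int) acc = acc ++ create_triplets_alt (m : Int) := by
  induction m using Nat.strong_induction_on with
  | _ m ih =>
    intro fuel acc hfuel
    match fuel with
    | fuel + 1 =>
      rcases Nat.eq_zero_or_pos m with h0 | h0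
      · subst h0
        simp [pvLoopA, create_triplets_alt]
      · have hne : (m : Int) ≠ 0 := by exact_mod_cast (by omega : m ≠ 0)
        rw [pvLoopA, if_pos hne]
        have hdiv : PySem.Int.floordiv (m : Int) 1000 = ((m / 1000 : Nat) : Int) := by
          exact_mod_cast PySem.Int.floordiv_natCast m 1000
        have hmod : PySem.Int.mod (m : Int) 1000 = ((m % 1000 : Nat) : Int) := by
          exact_mod_cast PySem.Int.mod_natCast m 1000
        rw [hdiv, hmod,
          ih (m / 1000) (Nat.div_lt_self h0 (by norm_num)) fuel _
            (by have := Nat.div_lt_self h0 (show 1 < 1000 by norm_num); omega)]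
        rw [pvAlt_step m h0]
        simp

-- ===== VERDICT (by name: the statement is the Claim_ definition above) =====
theorem create_triplets_spec : Claim_equal_create_triplets := by
  intro n _ hpre
  unfold Spec_create_triplets
  obtain ⟨m, rfl⟩ : ∃ m : Nat, n = (m : Int) := ⟨n.toNat, (Int.toNat_of_nonneg hpre).symm⟩
  rw [create_triplets]
  have hnat : (m : Int).natAbs = m := Int.natAbs_natCast m
  rw [hnat, pvLoopA_spec m (m + 1) [] (by omega)]
  simp
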